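-- pv_equiv track=rewrite | github.com/youdame/algorithm | 백준/Silver/2503. 숫자 야구/숫자 야구.py | check
-- ===== SOURCE A (Python) =====
-- def check(permutation, input):
--     num, strike, ball = input
--     ball = strike + ball
--
--     permutation_strike = 0
--     permutation_ball = 0
--     for index1 in range(len(num)):
--         for index2 in range(len(permutation)):
--             if num[index1] == permutation[index2] and index1 == index2:
--                 permutation_strike += 1
--         if num[index1] in permutation:
--             permutation_ball += 1
--     if permutation_strike == strike and permutation_ball == ball:
--         return True
--     else:
--         return False
-- ===== SOURCE B (Python) =====
-- def check(permutation, input):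
--     num, strike, ball = input
--     strikes = sum(1 for a, b in zip(num, permutation) if a == b)
--     balls = sum(1 for c in num if c in permutation)
--     return strikes == strike and balls == strike + ball
-- ===== Notes on version B (the rewrite author's own statement) =====
-- stated objective: simpler
-- what changed: Replaces A's nested index loop (whose inner scan over all of permutation can only match on the diagonal) with a single zip pass for strikes plus a membership count for balls, comparing the totals directly instead of mutating counters.
import Mathlib
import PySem

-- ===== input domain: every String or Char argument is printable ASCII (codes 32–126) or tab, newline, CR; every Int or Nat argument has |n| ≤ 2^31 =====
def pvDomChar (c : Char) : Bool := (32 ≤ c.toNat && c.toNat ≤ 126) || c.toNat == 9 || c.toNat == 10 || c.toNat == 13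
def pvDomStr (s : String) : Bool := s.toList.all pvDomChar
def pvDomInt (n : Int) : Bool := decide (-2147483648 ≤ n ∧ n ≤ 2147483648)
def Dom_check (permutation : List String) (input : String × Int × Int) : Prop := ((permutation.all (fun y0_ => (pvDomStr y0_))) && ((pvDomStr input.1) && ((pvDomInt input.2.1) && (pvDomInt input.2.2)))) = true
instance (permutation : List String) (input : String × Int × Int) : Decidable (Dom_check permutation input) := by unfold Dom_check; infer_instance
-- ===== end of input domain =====

-- B replaces A's nested index loop (whose inner scan can only match on the diagonal)
-- by a single zip pass for strikes and a membership count for balls (objective: simpler).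

-- ===== PORT A =====
-- num[index1] is the one-character string String.singleton of the character at index1
-- (indices come from range(len(...)), so the total pyGetD with a dummy default is exact).
def check (permutation : List String) (input : String × Int × Int) : Bool :=
  let num := input.1
  let strike := input.2.1
  let ball := strike + input.2.2
  let cs := num.toList
  let st :=
    (PySem.List.pyRange 0 (cs.length : Int) 1).foldl
      (fun (st : Int × Int) index1 =>
        let ps :=
          (PySem.List.pyRange 0 (permutation.length : Int) 1).foldl
            (fun s index2 =>
              if String.singleton (PySem.List.pyGetD cs index1 ' ') = PySem.List.pyGetD permutation index2 "" ∧ index1 = index2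
              then s + 1 else s) st.1
        let pb := if String.singleton (PySem.List.pyGetD cs index1 ' ') ∈ permutation then st.2 + 1 else st.2
        (ps, pb))
      ((0 : Int), (0 : Int))
  if st.1 = strike ∧ st.2 = ball then true else false

-- ===== PORT B =====
def check_alt (permutation : List String) (input : String × Int × Int) : Bool :=
  let num := input.1
  let strikes : Int :=
    (((num.toList.map String.singleton).zip permutation).countP (fun p => p.1 == p.2) : Nat)
  let balls : Int :=
    ((num.toList.map String.singleton).countP (fun c => decide (c ∈ permutation)) : Nat)
  decide (strikes = input.2.1) && decide (balls = input.2.1 + input.2.2)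

-- ===== PRECONDITION & SPEC =====
def Spec_check (permutation : List String) (input : String × Int × Int) (out : Bool) : Prop := out = check_alt permutation input
instance (permutation : List String) (input : String × Int × Int) (out : Bool) : Decidable (Spec_check permutation input out) := by unfold Spec_check; infer_instance

-- ===== CLAIM (what is proved, stated in full; the proofs are below) =====
def Claim_equal_check : Prop := ∀ (permutation : List String) (input : String × Int × Int), Dom_check permutation input → Spec_check permutation input (check permutation input)

-- ===== LEMMAS AND PROOFS =====

-- a 0/1 count over range n of a predicate that pins the index to i
theorem countP_range_diag (n : Nat) (q : Int → Bool) (i : Int) :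
    (List.range n).countP (fun (k : Nat) => q (k : Int) && decide (i = (k : Int)))
      = if 0 ≤ i ∧ i < (n : Int) ∧ q i then 1 else 0 := by
  induction n with
  | zero =>
    simp only [List.range_zero, List.countP_nil]
    split_ifs with h
    · exfalso; omega
    · rfl
  | succ n ih =>
    rw [List.range_succ, List.countP_append, ih]
    simp only [List.countP_cons, List.countP_nil, Nat.zero_add]
    push_cast
    by_cases hi : i = (n : Int)
    · subst hi
      by_cases hq : q (n : Int)
      · simp only [hq, Bool.true_and, decide_eq_true_eq]
        simp only [if_true, and_true]
        split_ifs <;> omega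
      · simp [hq]
    · have hd : (decide (i = (n : Int))) = false := by simp [hi]
      simp only [hd, Bool.and_false, if_neg Bool.false_ne_true, Nat.add_zero]
      by_cases hc : q i = true
      · simp only [hc, and_true]
        split_ifs <;> first | rfl | omega
      · simp [hc]

-- A's inner loop adds 1 exactly when the diagonal position matches
theorem inner_fold (perm : List String) (x : String) (i a : Int) :
    (PySem.List.pyRange 0 (perm.length : Int) 1).foldl
      (fun s j => if x = PySem.List.pyGetD perm j "" ∧ i = j then s + 1 else s) a
      = if 0 ≤ i ∧ i < (perm.length : Int) ∧ x = PySem.List.pyGetD perm i "" then a + 1 else a := by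
  rw [PySem.List.foldl_ite_add_one (p := fun j => x = PySem.List.pyGetD perm j "" ∧ i = j)]
  rw [PySem.List.pyRange_zero_nat, List.countP_map]
  simp only [Function.comp_def]
  have hp : (fun (k : Nat) => decide (x = PySem.List.pyGetD perm (k : Int) "" ∧ i = (k : Int)))
      = fun (k : Nat) => decide (x = PySem.List.pyGetD perm (k : Int) "") && decide (i = (k : Int)) := by
    funext k
    by_cases h1 : x = PySem.List.pyGetD perm (k : Int) "" <;> by_cases h2 : i = (k : Int) <;> simp [h1, h2]
  rw [hp, countP_range_diag perm.length (fun j => decide (x = PySem.List.pyGetD perm j "")) i]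
  simp only [decide_eq_true_eq]
  split_ifs <;> omega

-- B's zip count, re-indexed over range(len num)
theorem countP_zip_eq (l : List Char) (ys : List String) :
    ((l.map String.singleton).zip ys).countP (fun p => p.1 == p.2)
      = (List.range l.length).countP
          (fun k => decide (k < ys.length ∧ String.singleton (l.getD k ' ') = ys.getD k "")) := by
  induction l generalizing ys with
  | nil => simp
  | cons c l ih =>
    cases ys with
    | nil => simp
    | cons y ys =>
      rw [List.map_cons, List.zip_cons_cons, List.countP_cons, ih ys]
      simp only [List.length_cons]
      rw [List.range_succ_eq_map, List.countP_cons, List.countP_map]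
      simp [Function.comp_def]
      rfl

-- B's membership count, re-indexed over range(len l)
theorem countP_range_getD (l : List Char) (p : String → Bool) :
    (List.range l.length).countP (fun k => p (String.singleton (l.getD k ' ')))
      = (l.map String.singleton).countP p := by
  induction l with
  | nil => simp
  | cons c l ih =>
    rw [List.map_cons, List.countP_cons, List.length_cons, List.range_succ_eq_map,
      List.countP_cons, List.countP_map, ← ih]
    simp [Function.comp_def]

theorem check_eq (permutation : List String) (input : String × Int × Int) :
    check permutation input = check_alt permutation input := by
  simp only [check, check_alt]
  have hbody : (fun (st : Int × Int) index1 =>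
        let ps :=
          (PySem.List.pyRange 0 (permutation.length : Int) 1).foldl
            (fun s index2 =>
              if String.singleton (PySem.List.pyGetD input.1.toList index1 ' ') = PySem.List.pyGetD permutation index2 "" ∧ index1 = index2
              then s + 1 else s) st.1
        let pb := if String.singleton (PySem.List.pyGetD input.1.toList index1 ' ') ∈ permutation then st.2 + 1 else st.2
        (ps, pb))
      = fun (st : Int × Int) index1 =>
        ((if 0 ≤ index1 ∧ index1 < (permutation.length : Int) ∧ String.singleton (PySem.List.pyGetD input.1.toList index1 ' ') = PySem.List.pyGetD permutation index1 "" then st.1 + 1 else st.1),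
         (if String.singleton (PySem.List.pyGetD input.1.toList index1 ' ') ∈ permutation then st.2 + 1 else st.2)) := by
    funext st i1
    simp only [inner_fold]
  rw [hbody, PySem.List.foldl_prod_mk
      (f := fun (s : Int) index1 => if 0 ≤ index1 ∧ index1 < (permutation.length : Int) ∧ String.singleton (PySem.List.pyGetD input.1.toList index1 ' ') = PySem.List.pyGetD permutation index1 "" then s + 1 else s)
      (g := fun (s : Int) index1 => if String.singleton (PySem.List.pyGetD input.1.toList index1 ' ') ∈ permutation then s + 1 else s)]
  rw [PySem.List.foldl_ite_add_one, PySem.List.foldl_ite_add_one]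
  rw [PySem.List.pyRange_zero_nat, List.countP_map, List.countP_map]
  simp only [Function.comp_def]
  have hs : (fun (k : Nat) => decide (0 ≤ (k : Int) ∧ (k : Int) < (permutation.length : Int) ∧ String.singleton (PySem.List.pyGetD input.1.toList (k : Int) ' ') = PySem.List.pyGetD permutation (k : Int) ""))
      = fun (k : Nat) => decide (k < permutation.length ∧ String.singleton (input.1.toList.getD k ' ') = permutation.getD k "") := by
    funext k
    rw [decide_eq_decide]
    simp only [PySem.List.pyGetD_natCast]
    constructor
    · rintro ⟨-, h2, h3⟩; exact ⟨by exact_mod_cast h2, h3⟩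
    · rintro ⟨h2, h3⟩; exact ⟨by positivity, by exact_mod_cast h2, h3⟩
  have hb : (fun (k : Nat) => decide (String.singleton (PySem.List.pyGetD input.1.toList (k : Int) ' ') ∈ permutation))
      = fun (k : Nat) => (fun s => decide (s ∈ permutation)) (String.singleton (input.1.toList.getD k ' ')) := by
    funext k
    simp only [PySem.List.pyGetD_natCast]
  simp only [hs, hb]
  have hmem := countP_range_getD input.1.toList (fun s => decide (s ∈ permutation))
  simp only [] at hmem
  rw [hmem, ← countP_zip_eq]
  by_cases ha : ((((input.1.toList.map String.singleton).zip permutation).countP (fun p => p.1 == p.2) : Nat) : Int) = input.2.1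
    <;> by_cases hbb : ((((input.1.toList.map String.singleton).countP (fun c => decide (c ∈ permutation)) : Nat)) : Int) = input.2.1 + input.2.2
    <;> simp [ha, hbb]

-- ===== VERDICT (by name: the statement is the Claim_ definition above) =====
theorem check_spec : Claim_equal_check := by
  intro permutation input _
  unfold Spec_check
  exact check_eq permutation input
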